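-- pv_equiv track=rewrite | github.com/gtzanet/workflow_simulator | train.py | build_agent_action_space
-- ===== SOURCE A (Python) =====
-- from itertools import product
--
-- def build_agent_action_space(responsibilities, node_pool, cpu_actions):
--     # responsibilities: [(service_id, 'cpu'|'node'), ...]
--     dimensions = []
--     for sid, control in responsibilities:
--         options = list(cpu_actions) if control == "cpu" else list(node_pool)
--         dimensions.append((sid, control, options))
--
--     if not dimensions:
--         return [{}]
--
--     option_lists = [opts for _, _, opts in dimensions]
--     action_space = []
--
--     for combo in product(*option_lists):
--         action = {}
--         for (sid, control, _), value in zip(dimensions, combo):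
--             action.setdefault(sid, {})[control] = value
--         action_space.append(action)
--
--     return action_space
-- ===== SOURCE B (Python) =====
-- def build_agent_action_space(responsibilities, node_pool, cpu_actions):
--     # Incremental construction: extend each partial action dict dimension by
--     # dimension instead of materialising itertools.product tuples first.
--     def extend(partial, sid, control, value):
--         new = {s: dict(inner) for s, inner in partial.items()}
--         new.setdefault(sid, {})[control] = value
--         return new
--
--     def go(dims, partials):
--         if not dims:
--             return partials
--         sid, control = dims[0]
--         options = cpu_actions if control == "cpu" else node_pool
--         nxt = [extend(p, sid, control, v) for p in partials for v in options]
--         return go(dims[1:], nxt)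
--
--     return go(responsibilities, [{}])
-- ===== Notes on version B (the rewrite author's own statement) =====
-- stated objective: alternative
-- what changed: Replaces itertools.product over pre-collected option lists (then a per-combo zip/setdefault pass) with a recursive helper that grows an accumulator of partial action dicts dimension by dimension, extending every partial with every option of the current dimension.
import Mathlib
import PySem

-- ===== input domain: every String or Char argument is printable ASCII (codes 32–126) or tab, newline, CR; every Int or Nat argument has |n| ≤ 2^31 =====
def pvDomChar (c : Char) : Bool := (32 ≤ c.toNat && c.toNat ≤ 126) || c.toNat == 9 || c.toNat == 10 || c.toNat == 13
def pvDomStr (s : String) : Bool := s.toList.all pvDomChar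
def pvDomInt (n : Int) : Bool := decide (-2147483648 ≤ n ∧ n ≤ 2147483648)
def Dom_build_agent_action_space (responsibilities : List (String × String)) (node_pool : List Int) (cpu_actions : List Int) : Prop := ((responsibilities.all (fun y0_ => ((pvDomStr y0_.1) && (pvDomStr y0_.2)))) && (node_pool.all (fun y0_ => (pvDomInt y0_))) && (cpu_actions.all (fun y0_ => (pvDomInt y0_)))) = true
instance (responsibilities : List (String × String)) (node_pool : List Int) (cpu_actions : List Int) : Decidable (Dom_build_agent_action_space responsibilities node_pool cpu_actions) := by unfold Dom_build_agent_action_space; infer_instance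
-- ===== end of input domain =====

-- B builds the action space by extending partial action dicts dimension by dimension
-- instead of iterating itertools.product; alternative decomposition, same return values.

-- ===== PORT A =====
-- dict -> assoc-list convention at the boundary: nested PySem.Dict rendered as nested pairs
def pvToAssoc (d : PySem.Dict String (PySem.Dict String Int)) : List (String × List (String × Int)) :=
  d.items.map (fun kv => (kv.1, kv.2.items))

-- itertools.product(*option_lists), transliterated
def pvProduct : List (List Int) → List (List Int)
  | [] => [[]]
  | l :: ls => l.flatMap (fun x => (pvProduct ls).map (fun c => x :: c))

def build_agent_action_space (responsibilities : List (String × String)) (node_pool : List Int) (cpu_actions : List Int) : List (List (String × List (String × Int))) :=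
  let dimensions : List (String × String × List Int) :=
    responsibilities.foldl (fun acc p => acc ++ [(p.1, p.2, if p.2 == "cpu" then cpu_actions else node_pool)]) []
  if dimensions.isEmpty then [[]]  -- return [{}]
  else
    let option_lists := dimensions.map (fun d => d.2.2)
    (pvProduct option_lists).map (fun combo =>
      pvToAssoc ((dimensions.zip combo).foldl
        (fun action q => action.modify q.1.1 PySem.Dict.empty (fun inner => inner.insert q.1.2.1 q.2))
        PySem.Dict.empty))

-- ===== PORT B =====
-- 'new.setdefault(sid, {})[control] = value' on a fresh deep copy (immutable in Lean)
def pvExtend (p : PySem.Dict String (PySem.Dict String Int)) (sid control : String) (v : Int) : PySem.Dict String (PySem.Dict String Int) :=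
  p.modify sid PySem.Dict.empty (fun inner => inner.insert control v)

def pvGo (node_pool cpu_actions : List Int) : List (String × String) → List (PySem.Dict String (PySem.Dict String Int)) → List (PySem.Dict String (PySem.Dict String Int))
  | [], partials => partials
  | (sid, control) :: ds, partials =>
      pvGo node_pool cpu_actions ds
        (partials.flatMap (fun p => (if control == "cpu" then cpu_actions else node_pool).map (pvExtend p sid control)))

def build_agent_action_space_alt (responsibilities : List (String × String)) (node_pool : List Int) (cpu_actions : List Int) : List (List (String × List (String × Int))) :=
  (pvGo node_pool cpu_actions responsibilities [PySem.Dict.empty]).map pvToAssoc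

-- ===== PRECONDITION & SPEC =====
def Spec_build_agent_action_space (responsibilities : List (String × String)) (node_pool : List Int) (cpu_actions : List Int) (out : List (List (String × List (String × Int)))) : Prop := out = build_agent_action_space_alt responsibilities node_pool cpu_actions
instance (responsibilities : List (String × String)) (node_pool : List Int) (cpu_actions : List Int) (out : List (List (String × List (String × Int)))) : Decidable (Spec_build_agent_action_space responsibilities node_pool cpu_actions out) := by unfold Spec_build_agent_action_space; infer_instance

-- ===== CLAIM (what is proved, stated in full; the proofs are below) =====
def Claim_equal_build_agent_action_space : Prop := ∀ (responsibilities : List (String × String)) (node_pool : List Int) (cpu_actions : List Int), Dom_build_agent_action_space responsibilities node_pool cpu_actions → Spec_build_agent_action_space responsibilities node_pool cpu_actions (build_agent_action_space responsibilities node_pool cpu_actions)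

-- ===== LEMMAS AND PROOFS =====

-- B's recursion equals: for each partial, map A's per-combo fold over the cartesian product
lemma pvGo_eq (np ca : List Int) (dims : List (String × String))
    (partials : List (PySem.Dict String (PySem.Dict String Int))) :
    pvGo np ca dims partials =
      partials.flatMap (fun p =>
        (pvProduct ((dims.map (fun q => (q.1, q.2, if q.2 == "cpu" then ca else np))).map (fun d => d.2.2))).map
          (fun combo =>
            ((dims.map (fun q => (q.1, q.2, if q.2 == "cpu" then ca else np))).zip combo).foldl
              (fun action q => action.modify q.1.1 PySem.Dict.empty (fun inner => inner.insert q.1.2.1 q.2))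
              p)) := by
  induction dims generalizing partials with
  | nil => simp [pvGo, pvProduct]
  | cons d ds ih =>
      obtain ⟨sid, control⟩ := d
      simp only [pvGo, ih, List.map_cons, pvProduct, List.map_map,
        List.map_flatMap, List.flatMap_map, List.flatMap_assoc]
      refine List.flatMap_congr ?_
      intro p _
      refine List.flatMap_congr ?_
      intro v _
      refine List.map_congr_left ?_
      intro combo _
      simp [pvExtend, List.zip_cons_cons, List.foldl_cons]

theorem build_agent_action_space_spec : Claim_equal_build_agent_action_space := by
  intro responsibilities node_pool cpu_actions _
  show build_agent_action_space responsibilities node_pool cpu_actions =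
    build_agent_action_space_alt responsibilities node_pool cpu_actions
  unfold build_agent_action_space build_agent_action_space_alt
  rw [PySem.List.foldl_append_singleton_eq_map, pvGo_eq]
  cases responsibilities with
  | nil => simp [pvProduct, pvToAssoc, PySem.Dict.empty]
  | cons r rs => simp [List.map_map, Function.comp]
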